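-- pv_equiv track=rewrite | github.com/takagiy/lab | main.py | isspanning
-- ===== SOURCE A (Python) =====
-- def isspanning(tree, startv = 0, visited = None):
--     if visited == None:
--         visited = [startv]
--     for neighbor in tree[startv]:
--         visited.append(neighbor)
--         isspanning(tree, startv = neighbor, visited = visited)
--     expected = list(range(20))
--     return sorted(visited) == expected
-- ===== SOURCE B (Python) =====
-- def isspanning(tree, startv=0, visited=None):
--     # iterative DFS with an explicit stack instead of A's recursion;
--     # return value only (the mutation order of a caller-supplied `visited` differs from A's)
--     if visited is None:
--         visited = [startv]
--     stack = [startv]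
--     while stack:
--         node = stack.pop()
--         for neighbor in tree[node]:
--             visited.append(neighbor)
--             stack.append(neighbor)
--     return sorted(visited) == list(range(20))
-- ===== Notes on version B (the rewrite author's own statement) =====
-- stated objective: idiomatic
-- what changed: A's unguarded recursive DFS is replaced by an iterative traversal with an explicit stack (while stack: pop, append each neighbor to visited and push it), then the same sorted(visited) == list(range(20)) check; the two traversals append the same multiset of elements in a different order, which the sorted comparison cannot see.
import Mathlib
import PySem

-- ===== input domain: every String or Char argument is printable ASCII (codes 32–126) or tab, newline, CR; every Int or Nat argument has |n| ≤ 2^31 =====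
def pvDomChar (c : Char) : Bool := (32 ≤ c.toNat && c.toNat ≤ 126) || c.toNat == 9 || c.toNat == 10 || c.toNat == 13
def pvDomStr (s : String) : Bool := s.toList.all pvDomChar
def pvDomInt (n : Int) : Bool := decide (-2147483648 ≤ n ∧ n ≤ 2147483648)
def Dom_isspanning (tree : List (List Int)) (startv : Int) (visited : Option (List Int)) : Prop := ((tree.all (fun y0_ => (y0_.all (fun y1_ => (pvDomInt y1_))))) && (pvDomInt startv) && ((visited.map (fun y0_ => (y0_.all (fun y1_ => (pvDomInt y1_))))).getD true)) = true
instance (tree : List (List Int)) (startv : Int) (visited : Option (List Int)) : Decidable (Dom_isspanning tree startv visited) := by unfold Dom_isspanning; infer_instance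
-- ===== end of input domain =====

-- B replaces A's unguarded recursive DFS by an iterative explicit-stack loop; return value only
-- (both mutate a caller-supplied `visited` in Python, but append the same elements in a different order).

-- ===== PORT A =====
def pvExpected : List Int := PySem.List.pyRange 0 20 1

-- fuel bound shared by both ports' guards (enough for any terminating traversal; see pvMu_lt_pvK)
def pvK (tree : List (List Int)) : Nat := tree.flatten.length + 2

-- A's recursion is unguarded, so the port carries a fuel guard (unreachable under Pre_);
-- each call returns the updated `visited` (Python mutates it in place) plus the bool A computes.
def isspanningGo (fuel : Nat) (tree : List (List Int)) (startv : Int) (visited : List Int) :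
    List Int × Bool :=
  match fuel with
  | 0 => (visited, false)            -- fuel guard only
  | f+1 =>
    match PySem.List.pyGet? tree startv with
    | none => (visited, false)       -- IndexError in Python; excluded by Pre_
    | some nbs =>
      let v := nbs.foldl (fun v nb => (isspanningGo f tree nb (v ++ [nb])).1) visited
      (v, PySem.List.sorted v (fun x => x) false == pvExpected)

def isspanning (tree : List (List Int)) (startv : Int) (visited : Option (List Int)) : Bool :=
  let v0 := match visited with | none => [startv] | some v => v
  (isspanningGo (pvK tree) tree startv v0).2

-- ===== PORT B =====
-- fuel bound for B's while-loop (guard only: the exact number of pops under Pre_)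
def pvBCost (fuel : Nat) (tree : List (List Int)) (i : Int) : Nat :=
  match fuel with
  | 0 => 1
  | f+1 =>
    match PySem.List.pyGet? tree i with
    | none => 1
    | some nbs => 1 + (nbs.map (pvBCost f tree)).sum

def pvLoopB (fuel : Nat) (tree : List (List Int)) (visited stack : List Int) : List Int :=
  match fuel with
  | 0 => visited                      -- fuel guard only (the Python loop has none)
  | f+1 =>
    match stack with
    | [] => visited
    | node :: rest =>
      match PySem.List.pyGet? tree node with
      | none => visited               -- IndexError in Python; excluded by Pre_
      | some nbs =>
        let p := nbs.foldl (fun (p : List Int × List Int) nb => (p.1 ++ [nb], nb :: p.2))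
                   (visited, rest)
        pvLoopB f tree p.1 p.2

def isspanning_alt (tree : List (List Int)) (startv : Int) (visited : Option (List Int)) : Bool :=
  let v0 := match visited with | none => [startv] | some v => v
  let vfin := pvLoopB (pvBCost (pvK tree) tree startv) tree v0 [startv]
  PySem.List.sorted vfin (fun x => x) false == pvExpected

-- ===== PRECONDITION & SPEC =====
-- neighbours of a node value (empty where indexing would raise)
def pvAdj (tree : List (List Int)) (i : Int) : List Int := (PySem.List.pyGet? tree i).getD []
-- one breadth step of the reachable-set closure, deduplicated
def pvExpand (tree : List (List Int)) (s : List Int) : List Int :=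
  (s ++ s.flatMap (pvAdj tree)).dedup
-- iterated closure: after pvK iterations this is exactly the set of values reachable from s
def pvReach (tree : List (List Int)) : Nat → List Int → List Int
  | 0, s => s
  | f+1, s => pvReach tree f (pvExpand tree s)

-- Pre_ excludes exactly the inputs on which A raises: some node reachable from startv is an
-- invalid index into tree (IndexError) or lies on a cycle (unbounded recursion, RecursionError).
def Pre_isspanning (tree : List (List Int)) (startv : Int) (_visited : Option (List Int)) : Prop :=
  ∀ i ∈ pvReach tree (pvK tree) [startv],
    (PySem.List.pyGet? tree i).isSome = true ∧
    ∀ j ∈ pvAdj tree i, i ∉ pvReach tree (pvK tree) [j]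

instance (tree : List (List Int)) (startv : Int) (visited : Option (List Int)) :
    Decidable (Pre_isspanning tree startv visited) := by unfold Pre_isspanning; infer_instance

def pvWitness_isspanning : List (List Int) × Int × Option (List Int) := ([[1], []], 0, none)

def Spec_isspanning (tree : List (List Int)) (startv : Int) (visited : Option (List Int)) (out : Bool) : Prop := out = isspanning_alt tree startv visited
instance (tree : List (List Int)) (startv : Int) (visited : Option (List Int)) (out : Bool) : Decidable (Spec_isspanning tree startv visited out) := by unfold Spec_isspanning; infer_instance

-- ===== CLAIM (what is proved, stated in full; the proofs are below) =====
def Claim_equal_isspanning : Prop := ∀ (tree : List (List Int)) (startv : Int) (visited : Option (List Int)), Dom_isspanning tree startv visited → Pre_isspanning tree startv visited → Spec_isspanning tree startv visited (isspanning tree startv visited)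

-- ===== LEMMAS AND PROOFS =====

-- the elements appended to `visited` by A's call isspanning(tree, i, ·)
def pvVisits (fuel : Nat) (t : List (List Int)) (i : Int) : List Int :=
  match fuel with
  | 0 => []
  | f+1 =>
    match PySem.List.pyGet? t i with
    | none => []
    | some nbs => nbs.flatMap (fun j => j :: pvVisits f t j)

-- size of the reachable set: the proofs' termination measure
def pvMu (t : List (List Int)) (i : Int) : Nat := ((pvReach t (pvK t) [i]).dedup).length

lemma pvGoA_fst (f : Nat) (t : List (List Int)) :
    ∀ (i : Int) (v : List Int), (isspanningGo f t i v).1 = v ++ pvVisits f t i := by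
  induction f with
  | zero => intro i v; simp [isspanningGo, pvVisits]
  | succ f ih =>
    intro i v
    cases h : PySem.List.pyGet? t i with
    | none => simp [isspanningGo, pvVisits, h]
    | some nbs =>
      simp only [isspanningGo, pvVisits, h]
      have key : ∀ (l : List Int) (v : List Int),
          l.foldl (fun v nb => (isspanningGo f t nb (v ++ [nb])).1) v
            = v ++ l.flatMap (fun j => j :: pvVisits f t j) := by
        intro l
        induction l with
        | nil => intro v; simp
        | cons nb tl ihn =>
          intro v
          simp only [List.foldl_cons, List.flatMap_cons]
          rw [ih nb (v ++ [nb]), ihn (v ++ [nb] ++ pvVisits f t nb)]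
          simp
      exact key nbs v

lemma pvGoA_snd (f : Nat) (t : List (List Int)) (i : Int) (v : List Int)
    (nbs : List (Int)) (h : PySem.List.pyGet? t i = some nbs) :
    (isspanningGo (f+1) t i v).2
      = (PySem.List.sorted (v ++ pvVisits (f+1) t i) (fun x => x) false == pvExpected) := by
  have hf := pvGoA_fst (f+1) t i v
  simp only [isspanningGo, h] at hf ⊢
  rw [hf]

lemma pvFlatMapCongr {f g : Int → List Int} :
    ∀ (l : List Int), (∀ x ∈ l, f x = g x) → l.flatMap f = l.flatMap g := by
  intro l
  induction l with
  | nil => intro _; rfl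
  | cons x tl ih =>
    intro h
    simp only [List.flatMap_cons]
    rw [h x (List.mem_cons_self), ih (fun y hy => h y (List.mem_cons_of_mem _ hy))]

-- ---- reachable-set basics ----

lemma pvExpand_subset_left (t : List (List Int)) (s : List Int) : s ⊆ pvExpand t s := by
  intro x hx; simp [pvExpand, List.mem_dedup, List.mem_append]; exact Or.inl hx

lemma pvExpand_mono (t : List (List Int)) {s s' : List Int} (h : s ⊆ s') :
    pvExpand t s ⊆ pvExpand t s' := by
  intro x hx
  simp only [pvExpand, List.mem_dedup, List.mem_append, List.mem_flatMap] at hx ⊢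
  rcases hx with hx | ⟨a, ha, hxa⟩
  · exact Or.inl (h hx)
  · exact Or.inr ⟨a, h ha, hxa⟩

lemma pvReach_mono (t : List (List Int)) :
    ∀ (f : Nat) {s s' : List Int}, s ⊆ s' → pvReach t f s ⊆ pvReach t f s' := by
  intro f
  induction f with
  | zero => intro s s' h; exact h
  | succ f ih => intro s s' h; exact ih (pvExpand_mono t h)

lemma subset_pvReach (t : List (List Int)) :
    ∀ (f : Nat) (s : List Int), s ⊆ pvReach t f s := by
  intro f
  induction f with
  | zero => intro s; exact fun _ h => h
  | succ f ih =>
    intro s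
    exact fun x hx => ih (pvExpand t s) (pvExpand_subset_left t s hx)

lemma pvReach_fuel_succ (t : List (List Int)) (f : Nat) (s : List Int) :
    pvReach t f s ⊆ pvReach t (f+1) s :=
  pvReach_mono t f (pvExpand_subset_left t s)

lemma pvReach_fuel_le (t : List (List Int)) {f g : Nat} (h : f ≤ g) (s : List Int) :
    pvReach t f s ⊆ pvReach t g s := by
  induction g with
  | zero =>
    have hf0 : f = 0 := by omega
    subst hf0; exact fun _ h => h
  | succ g ih =>
    rcases Nat.lt_or_ge f (g+1) with hlt | hge
    · exact fun x hx => pvReach_fuel_succ t g s (ih (by omega) hx)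
    · have : f = g + 1 := by omega
      subst this; exact fun _ h => h

lemma pvAdj_subset_flatten (t : List (List Int)) (i : Int) : pvAdj t i ⊆ t.flatten := by
  intro x hx
  unfold pvAdj at hx
  cases h : PySem.List.pyGet? t i with
  | none => rw [h] at hx; simp at hx
  | some nbs =>
    rw [h] at hx
    simp only [Option.getD_some] at hx
    exact List.mem_flatten.mpr ⟨nbs, PySem.List.mem_of_pyGet?_eq_some t h, hx⟩

lemma pvReach_scope (t : List (List Int)) :
    ∀ (f : Nat) (s : List Int), pvReach t f s ⊆ s ++ t.flatten := by
  intro f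
  induction f with
  | zero => intro s x hx; exact List.mem_append.mpr (Or.inl hx)
  | succ f ih =>
    intro s x hx
    have := ih (pvExpand t s) hx
    rcases List.mem_append.mp this with h | h
    · simp only [pvExpand, List.mem_dedup, List.mem_append, List.mem_flatMap] at h
      rcases h with h | ⟨a, _, hxa⟩
      · exact List.mem_append.mpr (Or.inl h)
      · exact List.mem_append.mpr (Or.inr (pvAdj_subset_flatten t a hxa))
    · exact List.mem_append.mpr (Or.inr h)

-- ---- soundness and completeness of pvReach w.r.t. step reachability ----

lemma pvReach_sound (t : List (List Int)) :
    ∀ (f : Nat) (s : List Int) (x : Int), x ∈ pvReach t f s →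
      ∃ a ∈ s, Relation.ReflTransGen (fun a b => b ∈ pvAdj t a) a x := by
  intro f
  induction f with
  | zero => intro s x hx; exact ⟨x, hx, Relation.ReflTransGen.refl⟩
  | succ f ih =>
    intro s x hx
    obtain ⟨a, ha, hax⟩ := ih (pvExpand t s) x hx
    simp only [pvExpand, List.mem_dedup, List.mem_append, List.mem_flatMap] at ha
    rcases ha with ha | ⟨c, hc, hac⟩
    · exact ⟨a, ha, hax⟩
    · exact ⟨c, hc, Relation.ReflTransGen.head hac hax⟩

-- hand-rolled chain predicate (a walk i -r-> l0 -r-> l1 -r-> …)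
def pvChain (r : Int → Int → Prop) : Int → List Int → Prop
  | _, [] => True
  | a, b :: l => r a b ∧ pvChain r b l

lemma pvChain_cons {r : Int → Int → Prop} {a b : Int} {l : List Int} :
    pvChain r a (b :: l) ↔ r a b ∧ pvChain r b l := Iff.rfl

lemma pvChain_of_rtg {r : Int → Int → Prop} {i j : Int}
    (h : Relation.ReflTransGen r i j) :
    ∃ l, pvChain r i l ∧ (i :: l).getLast? = some j := by
  induction h using Relation.ReflTransGen.head_induction_on with
  | refl => exact ⟨[], trivial, rfl⟩
  | head hab _ ih =>
    obtain ⟨l, hch, hlast⟩ := ih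
    exact ⟨_ :: l, pvChain_cons.mpr ⟨hab, hch⟩, by rw [List.getLast?_cons_cons]; exact hlast⟩

lemma pvChain_split {r : Int → Int → Prop} :
    ∀ (l1 : List Int) (a b : Int) (l2 : List Int),
      pvChain r a (l1 ++ b :: l2) → pvChain r b l2 := by
  intro l1
  induction l1 with
  | nil => intro a b l2 h; exact (pvChain_cons.mp h).2
  | cons c t1 ih =>
    intro a b l2 h
    exact ih c b l2 (pvChain_cons.mp h).2

lemma pvChain_last_mem (t : List (List Int)) :
    ∀ (l : List Int) (i : Int), pvChain (fun a b => b ∈ pvAdj t a) i l →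
      (i :: l).getLast (by simp) ∈ pvReach t l.length [i] := by
  intro l
  induction l with
  | nil => intro i _; simp [pvReach]
  | cons b tl ih =>
    intro i hch
    rw [pvChain_cons] at hch
    have hmem := ih b hch.2
    have hb : [b] ⊆ pvExpand t [i] := by
      intro x hx
      simp only [List.mem_singleton] at hx
      subst hx
      simp only [pvExpand, List.mem_dedup, List.mem_append, List.mem_flatMap]
      exact Or.inr ⟨i, List.mem_singleton.mpr rfl, hch.1⟩
    have hstep : pvReach t tl.length [b] ⊆ pvReach t (tl.length + 1) [i] :=
      fun x hx => pvReach_mono t tl.length hb hx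
    have hlast : (i :: b :: tl).getLast (by simp) = (b :: tl).getLast (by simp) := by
      simp [List.getLast_cons]
    rw [hlast]
    exact hstep hmem

-- any chain can be shortened to a duplicate-free chain with the same endpoints
lemma pvChain_shorten {r : Int → Int → Prop} :
    ∀ (n : Nat) (l : List Int) (i : Int), l.length ≤ n → pvChain r i l →
      ∃ l', pvChain r i l' ∧ l' ⊆ l ∧ (i :: l').getLast? = (i :: l).getLast? ∧
        (i :: l').Nodup := by
  intro n
  induction n with
  | zero =>
    intro l i hlen _
    have hl : l = [] := List.length_eq_zero_iff.mp (by omega)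
    subst hl
    exact ⟨[], trivial, fun _ h => h, rfl, by simp⟩
  | succ n ih =>
    intro l i hlen hch
    by_cases hi : i ∈ l
    · obtain ⟨l1, l2, rfl⟩ := List.append_of_mem hi
      have hch2 : pvChain r i l2 := pvChain_split l1 i i l2 hch
      obtain ⟨l', hc', hsub', hlast', hnd'⟩ := ih l2 i (by
        simp [List.length_append] at hlen ⊢
        omega) hch2
      refine ⟨l', hc', fun x hx => ?_, ?_, hnd'⟩
      · have := hsub' hx
        simp [List.mem_append]
        exact Or.inr (Or.inr this)
      · rw [hlast']
        exact (List.getLast?_append_cons (i :: l1) i l2).symm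
    · cases l with
      | nil => exact ⟨[], trivial, fun _ h => h, rfl, by simp⟩
      | cons b tl =>
        rw [pvChain_cons] at hch
        obtain ⟨l', hc', hsub', hlast', hnd'⟩ := ih tl b (by simp at hlen; omega) hch.2
        refine ⟨b :: l', pvChain_cons.mpr ⟨hch.1, hc'⟩, ?_, ?_, ?_⟩
        · intro x hx
          rcases List.mem_cons.mp hx with rfl | hx
          · exact List.mem_cons_self
          · exact List.mem_cons_of_mem _ (hsub' hx)
        · rw [List.getLast?_cons_cons, hlast', List.getLast?_cons_cons]
        · refine List.nodup_cons.mpr ⟨?_, hnd'⟩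
          intro hmem
          apply hi
          rcases List.mem_cons.mp hmem with rfl | hmem
          · exact List.mem_cons_self
          · exact List.mem_cons_of_mem _ (hsub' hmem)

lemma pvChain_subset_flatten (t : List (List Int)) :
    ∀ (l : List Int) (i : Int), pvChain (fun a b => b ∈ pvAdj t a) i l → l ⊆ t.flatten := by
  intro l
  induction l with
  | nil => intro i _ x hx; simp at hx
  | cons b tl ih =>
    intro i hch x hx
    rw [pvChain_cons] at hch
    rcases List.mem_cons.mp hx with rfl | hx
    · exact pvAdj_subset_flatten t i hch.1
    · exact ih b hch.2 hx

lemma pvNodup_length_le {l m : List Int} (hnd : l.Nodup) (hsub : l ⊆ m) :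
    l.length ≤ m.length := by
  calc l.length = l.toFinset.card := (List.toFinset_card_of_nodup hnd).symm
    _ ≤ m.toFinset.card := Finset.card_le_card (fun x hx => by
        simp only [List.mem_toFinset] at hx ⊢; exact hsub hx)
    _ ≤ m.length := List.toFinset_card_le m

lemma pvReach_complete (t : List (List Int)) {i j : Int}
    (h : Relation.ReflTransGen (fun a b => b ∈ pvAdj t a) i j) :
    j ∈ pvReach t (pvK t) [i] := by
  obtain ⟨l, hch, hlast⟩ := pvChain_of_rtg h
  obtain ⟨l', hc', hsub', hlast', hnd'⟩ := pvChain_shorten l.length l i le_rfl hch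
  have hj : (i :: l').getLast (by simp) = j := by
    have h1 : (i :: l').getLast? = some ((i :: l').getLast (by simp)) :=
      List.getLast?_eq_some_getLast (by simp)
    rw [hlast, h1] at hlast'
    exact Option.some_inj.mp hlast'
  have hmem := pvChain_last_mem t l' i hc'
  rw [hj] at hmem
  have hbound : l'.length ≤ pvK t := by
    have h1 : l' ⊆ t.flatten := pvChain_subset_flatten t l' i hc'
    have h2 : l'.Nodup := (List.nodup_cons.mp hnd').2
    have := pvNodup_length_le h2 h1
    unfold pvK; omega
  exact pvReach_fuel_le t hbound [i] hmem

-- the reachable set is closed under taking neighbours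
lemma pvReach_closed (t : List (List Int)) {s0 i j : Int}
    (hi : i ∈ pvReach t (pvK t) [s0]) (hj : j ∈ pvAdj t i) :
    j ∈ pvReach t (pvK t) [s0] := by
  obtain ⟨a, ha, hax⟩ := pvReach_sound t (pvK t) [s0] i hi
  rcases List.mem_singleton.mp ha with rfl
  exact pvReach_complete t (Relation.ReflTransGen.tail hax hj)

lemma pvMu_pos (t : List (List Int)) (i : Int) : 1 ≤ pvMu t i := by
  have : i ∈ pvReach t (pvK t) [i] := subset_pvReach t (pvK t) [i] (List.mem_singleton.mpr rfl)
  have : i ∈ (pvReach t (pvK t) [i]).dedup := List.mem_dedup.mpr this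
  unfold pvMu
  cases h : (pvReach t (pvK t) [i]).dedup with
  | nil => rw [h] at this; simp at this
  | cons a l => simp

lemma pvMu_lt_pvK (t : List (List Int)) (i : Int) : pvMu t i < pvK t := by
  unfold pvMu pvK
  have h1 : (pvReach t (pvK t) [i]).dedup.length ≤ ([i] ++ t.flatten).length := by
    refine pvNodup_length_le (List.nodup_dedup _) ?_
    intro x hx
    exact pvReach_scope t (pvK t) [i] (List.mem_dedup.mp hx)
  rw [List.length_append, List.length_singleton] at h1
  unfold pvK at h1
  omega

-- a step to a non-cyclic neighbour strictly shrinks the reachable set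
lemma pvMu_lt (t : List (List Int)) {i j : Int} (hj : j ∈ pvAdj t i)
    (hni : i ∉ pvReach t (pvK t) [j]) : pvMu t j < pvMu t i := by
  have hsub : pvReach t (pvK t) [j] ⊆ pvReach t (pvK t) [i] := by
    intro x hx
    obtain ⟨a, ha, hax⟩ := pvReach_sound t (pvK t) [j] x hx
    rcases List.mem_singleton.mp ha with rfl
    exact pvReach_complete t (Relation.ReflTransGen.head hj hax)
  have hii : i ∈ pvReach t (pvK t) [i] :=
    subset_pvReach t (pvK t) [i] (List.mem_singleton.mpr rfl)
  unfold pvMu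
  rw [← List.card_toFinset, ← List.card_toFinset]
  refine Finset.card_lt_card ?_
  constructor
  · intro x hx
    simp only [List.mem_toFinset] at hx ⊢
    exact hsub hx
  · intro hsup
    have : i ∈ (pvReach t (pvK t) [j]).toFinset := hsup (List.mem_toFinset.mpr hii)
    exact hni (List.mem_toFinset.mp this)

-- ---- stability of pvVisits / pvBCost in the fuel, under Pre_ ----

def pvPreOn (t : List (List Int)) (s0 : Int) : Prop :=
  ∀ i ∈ pvReach t (pvK t) [s0],
    (PySem.List.pyGet? t i).isSome = true ∧
    ∀ j ∈ pvAdj t i, i ∉ pvReach t (pvK t) [j]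

lemma pvAdj_of_some {t : List (List Int)} {i : Int} {nbs : List Int}
    (h : PySem.List.pyGet? t i = some nbs) : pvAdj t i = nbs := by
  unfold pvAdj; rw [h]; rfl

lemma pvVisits_stable (t : List (List Int)) (s0 : Int) (hP : pvPreOn t s0) :
    ∀ (m : Nat) (i : Int) (f g : Nat), i ∈ pvReach t (pvK t) [s0] →
      pvMu t i ≤ m → pvMu t i ≤ f → pvMu t i ≤ g →
      pvVisits f t i = pvVisits g t i := by
  intro m
  induction m with
  | zero => intro i f g _ hm _ _; have := pvMu_pos t i; omega
  | succ m ih =>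
    intro i f g hi hm hf hg
    have hpos := pvMu_pos t i
    cases f with
    | zero => omega
    | succ f' =>
      cases g with
      | zero => omega
      | succ g' =>
        obtain ⟨nbs, hget⟩ := Option.isSome_iff_exists.mp ((hP i hi).1)
        simp only [pvVisits, hget]
        refine pvFlatMapCongr _ ?_
        intro j hj
        have hjadj : j ∈ pvAdj t i := by rw [pvAdj_of_some hget]; exact hj
        have hjr : j ∈ pvReach t (pvK t) [s0] := pvReach_closed t hi hjadj
        have hlt : pvMu t j < pvMu t i := pvMu_lt t hjadj ((hP i hi).2 j hjadj)
        rw [ih j f' g' hjr (by omega) (by omega) (by omega)]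

lemma pvBCost_pos (f : Nat) (t : List (List Int)) (i : Int) : 1 ≤ pvBCost f t i := by
  cases f with
  | zero => simp [pvBCost]
  | succ f => cases h : PySem.List.pyGet? t i <;> simp [pvBCost, h]

lemma pvBCost_succ (f : Nat) (t : List (List Int)) (i : Int) (nbs : List Int)
    (h : PySem.List.pyGet? t i = some nbs) :
    pvBCost (f+1) t i = 1 + (nbs.map (pvBCost f t)).sum := by
  conv_lhs => rw [pvBCost]
  rw [h]

lemma pvVisits_succ (f : Nat) (t : List (List Int)) (i : Int) (nbs : List Int)
    (h : PySem.List.pyGet? t i = some nbs) :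
    pvVisits (f+1) t i = nbs.flatMap (fun j => j :: pvVisits f t j) := by
  conv_lhs => rw [pvVisits]
  rw [h]

lemma pvBCost_stable (t : List (List Int)) (s0 : Int) (hP : pvPreOn t s0) :
    ∀ (m : Nat) (i : Int) (f g : Nat), i ∈ pvReach t (pvK t) [s0] →
      pvMu t i ≤ m → pvMu t i ≤ f → pvMu t i ≤ g →
      pvBCost f t i = pvBCost g t i := by
  intro m
  induction m with
  | zero => intro i f g _ hm _ _; have := pvMu_pos t i; omega
  | succ m ih =>
    intro i f g hi hm hf hg
    have hpos := pvMu_pos t i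
    cases f with
    | zero => omega
    | succ f' =>
      cases g with
      | zero => omega
      | succ g' =>
        obtain ⟨nbs, hget⟩ := Option.isSome_iff_exists.mp ((hP i hi).1)
        simp only [pvBCost, hget]
        congr 1
        refine congrArg List.sum (List.map_congr_left ?_)
        intro j hj
        have hjadj : j ∈ pvAdj t i := by rw [pvAdj_of_some hget]; exact hj
        have hjr : j ∈ pvReach t (pvK t) [s0] := pvReach_closed t hi hjadj
        have hlt : pvMu t j < pvMu t i := pvMu_lt t hjadj ((hP i hi).2 j hjadj)
        exact ih j f' g' hjr (by omega) (by omega) (by omega)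

lemma pvFoldB (nbs : List Int) :
    ∀ (v rest : List Int),
      nbs.foldl (fun (p : List Int × List Int) nb => (p.1 ++ [nb], nb :: p.2)) (v, rest)
        = (v ++ nbs, nbs.reverse ++ rest) := by
  induction nbs with
  | nil => intro v rest; simp
  | cons nb tl ih =>
    intro v rest
    simp only [List.foldl_cons]
    rw [ih (v ++ [nb]) (nb :: rest)]
    simp

lemma pvFlatMapConsPerm (g : Int → List Int) (xs : List Int) :
    (xs.flatMap (fun j => j :: g j)).Perm (xs ++ xs.flatMap g) := by
  induction xs with
  | nil => simp
  | cons x tl ih =>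
    simp only [List.flatMap_cons, List.cons_append]
    refine List.Perm.cons x ?_
    refine (List.Perm.append_left (g x) ih).trans ?_
    have h1 : (g x ++ (tl ++ tl.flatMap g)).Perm ((g x ++ tl) ++ tl.flatMap g) := by
      rw [List.append_assoc]
    have h2 : ((g x ++ tl) ++ tl.flatMap g).Perm ((tl ++ g x) ++ tl.flatMap g) :=
      List.Perm.append_right _ List.perm_append_comm
    have h3 : ((tl ++ g x) ++ tl.flatMap g).Perm (tl ++ (g x ++ tl.flatMap g)) := by
      rw [List.append_assoc]
    exact (h1.trans h2).trans h3

lemma pvLoopB_perm (t : List (List Int)) (s0 : Int) (hP : pvPreOn t s0) :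
    ∀ (fuel : Nat) (st v : List Int),
      (∀ i ∈ st, i ∈ pvReach t (pvK t) [s0]) →
      (st.map (pvBCost (pvK t) t)).sum ≤ fuel →
      (pvLoopB fuel t v st).Perm (v ++ st.flatMap (fun i => pvVisits (pvK t) t i)) := by
  intro fuel
  induction fuel with
  | zero =>
    intro st v hmem hsum
    cases st with
    | nil => simp [pvLoopB]
    | cons node rest =>
      have := pvBCost_pos (pvK t) t node
      simp only [List.map_cons, List.sum_cons] at hsum
      omega
  | succ f ih =>
    intro st v hmem hsum
    cases st with
    | nil => simp [pvLoopB]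
    | cons node rest =>
      have hnode_r := hmem node List.mem_cons_self
      obtain ⟨nbs, hget⟩ := Option.isSome_iff_exists.mp ((hP node hnode_r).1)
      have hadj : pvAdj t node = nbs := pvAdj_of_some hget
      have hnbr : ∀ j ∈ nbs, j ∈ pvReach t (pvK t) [s0] := by
        intro j hj
        exact pvReach_closed t hnode_r (hadj ▸ hj)
      have hmuK : ∀ j ∈ nbs, pvMu t j ≤ pvK t - 1 := by
        intro j hj
        have hjadj : j ∈ pvAdj t node := hadj ▸ hj
        have := pvMu_lt t hjadj ((hP node hnode_r).2 j hjadj)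
        have := pvMu_lt_pvK t node
        omega
      have hK1 : pvK t = (pvK t - 1) + 1 := by unfold pvK; omega
      -- fuel bookkeeping: one pop spent, the neighbours' costs pushed
      have hcost : (nbs.map (pvBCost (pvK t - 1) t)).sum
          = (nbs.map (pvBCost (pvK t) t)).sum := by
        refine congrArg List.sum (List.map_congr_left ?_)
        intro j hj
        exact pvBCost_stable t s0 hP (pvMu t j) j (pvK t - 1) (pvK t) (hnbr j hj)
          le_rfl (hmuK j hj) (le_of_lt (pvMu_lt_pvK t j))
      have hnodecost : pvBCost (pvK t) t node
          = 1 + (nbs.map (pvBCost (pvK t) t)).sum := by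
        conv_lhs => rw [hK1]
        rw [pvBCost_succ (pvK t - 1) t node nbs hget, hcost]
      have hsum' : ((nbs.reverse ++ rest).map (pvBCost (pvK t) t)).sum ≤ f := by
        simp only [List.map_cons, List.sum_cons] at hsum
        rw [hnodecost] at hsum
        simp only [List.map_append, List.sum_append, List.map_reverse, List.sum_reverse]
        omega
      have hmem' : ∀ i ∈ nbs.reverse ++ rest, i ∈ pvReach t (pvK t) [s0] := by
        intro i hi'
        rcases List.mem_append.mp hi' with h | h
        · exact hnbr i (List.mem_reverse.mp h)
        · exact hmem i (List.mem_cons_of_mem _ h)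
      simp only [pvLoopB, hget, pvFoldB]
      refine (ih _ _ hmem' hsum').trans ?_
      -- now a pure multiset shuffle
      have hV : pvVisits (pvK t) t node
          = nbs.flatMap (fun j => j :: pvVisits (pvK t) t j) := by
        conv_lhs => rw [hK1]
        rw [pvVisits_succ (pvK t - 1) t node nbs hget]
        refine pvFlatMapCongr _ ?_
        intro j hj
        congr 1
        exact pvVisits_stable t s0 hP (pvMu t j) j (pvK t - 1) (pvK t) (hnbr j hj)
          le_rfl (hmuK j hj) (le_of_lt (pvMu_lt_pvK t j))
      simp only [List.flatMap_cons, List.flatMap_append, hV]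
      have prev : (nbs.reverse.flatMap (fun i => pvVisits (pvK t) t i)).Perm
          (nbs.flatMap (fun i => pvVisits (pvK t) t i)) :=
        (List.reverse_perm _).flatMap (fun a _ => List.Perm.refl _)
      have pcons := pvFlatMapConsPerm (fun j => pvVisits (pvK t) t j) nbs
      have step1 : ((v ++ nbs) ++
            (nbs.reverse.flatMap (fun i => pvVisits (pvK t) t i) ++
             rest.flatMap (fun i => pvVisits (pvK t) t i))).Perm
          ((v ++ nbs) ++
            (nbs.flatMap (fun i => pvVisits (pvK t) t i) ++
             rest.flatMap (fun i => pvVisits (pvK t) t i))) :=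
        List.Perm.append_left _ (prev.append_right _)
      have step2 : (v ++ nbs) ++
            (nbs.flatMap (fun i => pvVisits (pvK t) t i) ++
             rest.flatMap (fun i => pvVisits (pvK t) t i))
          = v ++ ((nbs ++ nbs.flatMap (fun i => pvVisits (pvK t) t i)) ++
             rest.flatMap (fun i => pvVisits (pvK t) t i)) := by
        simp [List.append_assoc]
      have step3 : (v ++ ((nbs ++ nbs.flatMap (fun i => pvVisits (pvK t) t i)) ++
             rest.flatMap (fun i => pvVisits (pvK t) t i))).Perm
          (v ++ (nbs.flatMap (fun j => j :: pvVisits (pvK t) t j) ++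
             rest.flatMap (fun i => pvVisits (pvK t) t i))) :=
        List.Perm.append_left _ (List.Perm.append_right _ pcons.symm)
      exact step1.trans (step2 ▸ step3)

-- ===== VERDICT (by name: the statement is the Claim_ definition above) =====
theorem isspanning_spec : Claim_equal_isspanning := by
  intro tree startv visited _ hPre
  have hP : pvPreOn tree startv := hPre
  have hs0 : startv ∈ pvReach tree (pvK tree) [startv] :=
    subset_pvReach tree (pvK tree) [startv] (List.mem_singleton.mpr rfl)
  obtain ⟨nbs, hget⟩ := Option.isSome_iff_exists.mp ((hP startv hs0).1)
  have hK1 : pvK tree = (pvK tree - 1) + 1 := by unfold pvK; omega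
  have core : ∀ v0 : List Int,
      (isspanningGo (pvK tree) tree startv v0).2
        = (PySem.List.sorted (pvLoopB (pvBCost (pvK tree) tree startv) tree v0 [startv])
             (fun x => x) false == pvExpected) := by
    intro v0
    have hA : (isspanningGo (pvK tree) tree startv v0).2
        = (PySem.List.sorted (v0 ++ pvVisits (pvK tree) tree startv)
             (fun x => x) false == pvExpected) := by
      conv_lhs => rw [hK1]
      conv_rhs => rw [hK1]
      exact pvGoA_snd (pvK tree - 1) tree startv v0 nbs hget
    rw [hA]
    have hperm := pvLoopB_perm tree startv hP (pvBCost (pvK tree) tree startv) [startv] v0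
      (by intro i hi; rcases List.mem_singleton.mp hi with rfl; exact hs0)
      (by simp)
    simp only [List.flatMap_cons, List.flatMap_nil, List.append_nil] at hperm
    rw [PySem.List.sorted_eq_sorted_of_perm _ _ (fun x => x) (fun a b h => h) hperm.symm]
  show isspanning tree startv visited = isspanning_alt tree startv visited
  cases visited with
  | none => exact core [startv]
  | some v => exact core v
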